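-- pv_equiv track=rewrite | github.com/jorgerbonifasi/Telegram-Bot | skills/lists/__init__.py | _parse_action
-- ===== SOURCE A (Python) =====
-- def _parse_action(text: str) -> str:
--     t = text.lower().strip()
--     if not t:
--         return "show_all"
--     if any(t.startswith(w) for w in ["add ", "buy ", "get ", "need ", "pick up "]):
--         return "add"
--     if any(t.startswith(w) for w in ["done ", "remove ", "delete ", "tick ", "bought ", "got "]):
--         return "done"
--     if t.startswith("clear ") or t.startswith("empty "):
--         return "clear"
--     return "show"
-- ===== SOURCE B (Python) =====
-- _HEAD = {
--     "add": "add", "buy": "add", "get": "add", "need": "add",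
--     "done": "done", "remove": "done", "delete": "done", "tick": "done",
--     "bought": "done", "got": "done",
--     "clear": "clear", "empty": "clear",
-- }
--
-- def _parse_action(text: str) -> str:
--     t = text.lower().strip()
--     if not t:
--         return "show_all"
--     head, sep, rest = t.partition(" ")
--     if not sep:
--         return "show"
--     if head == "pick" and rest.startswith("up "):
--         return "add"
--     return _HEAD.get(head, "show")
-- ===== Notes on version B (the rewrite author's own statement) =====
-- stated objective: alternative
-- what changed: Instead of scanning keyword prefixes with startswith chains, B tokenizes: it partitions the text at the first space and classifies the first word by a single dict lookup, with one special case for the sole two-word keyword.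
import Mathlib
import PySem

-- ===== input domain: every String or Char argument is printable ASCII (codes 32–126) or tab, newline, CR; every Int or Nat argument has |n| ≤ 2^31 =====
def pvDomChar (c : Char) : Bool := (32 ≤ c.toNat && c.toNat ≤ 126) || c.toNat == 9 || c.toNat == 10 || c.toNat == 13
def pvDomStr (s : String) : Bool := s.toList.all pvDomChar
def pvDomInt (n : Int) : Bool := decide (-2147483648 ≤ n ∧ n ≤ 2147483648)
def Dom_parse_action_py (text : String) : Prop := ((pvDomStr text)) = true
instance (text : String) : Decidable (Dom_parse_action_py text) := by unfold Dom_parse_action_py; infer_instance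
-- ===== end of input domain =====

-- B replaces A's chained startswith prefix tests by tokenizing: partition the text at the
-- first space and classify the first word with one dict lookup ('pick up' special-cased).

-- ===== PORT A =====
def parse_action_py (text : String) : String :=
  let t := PySem.Str.strip (PySem.Str.lower text)
  if t = "" then "show_all"
  else if (["add ", "buy ", "get ", "need ", "pick up "].any
            fun w => PySem.Str.startswith t w) then "add"
  else if (["done ", "remove ", "delete ", "tick ", "bought ", "got "].any
            fun w => PySem.Str.startswith t w) then "done"
  else if PySem.Str.startswith t "clear " || PySem.Str.startswith t "empty " then "clear"
  else "show"

-- ===== PORT B =====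
-- the _HEAD dict (first word -> action); keys kept as lists of chars, the string bridge form
def pvHEAD : PySem.Dict (List Char) String :=
  PySem.Dict.ofList
    [("add".toList, "add"), ("buy".toList, "add"), ("get".toList, "add"), ("need".toList, "add"),
     ("done".toList, "done"), ("remove".toList, "done"), ("delete".toList, "done"),
     ("tick".toList, "done"), ("bought".toList, "done"), ("got".toList, "done"),
     ("clear".toList, "clear"), ("empty".toList, "clear")]

def parse_action_py_alt (text : String) : String :=
  let t := PySem.Str.strip (PySem.Str.lower text)
  if t = "" then "show_all"
  else
    -- t.partition(" ") ported by hand (exact): head = chars before the first space,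
    -- sep empty ⇔ no space in t, rest = chars after the first space
    let l := t.toList
    let head := l.takeWhile (fun c => c ≠ ' ')
    let sepRest := l.dropWhile (fun c => c ≠ ' ')
    if sepRest = [] then "show"
    else
      let rest := sepRest.drop 1
      if head = "pick".toList ∧ PySem.Chars.startswith rest "up ".toList then "add"
      else PySem.Dict.getD pvHEAD head "show"

-- ===== PRECONDITION & SPEC =====
def Spec_parse_action_py (text : String) (out : String) : Prop := out = parse_action_py_alt text
instance (text : String) (out : String) : Decidable (Spec_parse_action_py text out) := by unfold Spec_parse_action_py; infer_instance

-- ===== CLAIM (what is proved, stated in full; the proofs are below) =====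
def Claim_equal_parse_action_py : Prop := ∀ (text : String), Dom_parse_action_py text → Spec_parse_action_py text (parse_action_py text)

-- ===== LEMMAS AND PROOFS =====

-- the first element surviving dropWhile (· ≠ ' ') is a space
theorem pv_dropWhile_head (l : List Char) (c : Char) (r : List Char)
    (h : l.dropWhile (fun c => !decide (c = ' ')) = c :: r) : c = ' ' := by
  induction l with
  | nil => simp at h
  | cons a t ih =>
    rw [List.dropWhile_cons] at h
    by_cases ha : a = ' '
    · rw [if_neg (by simp [ha])] at h
      injection h with h1 _
      exact h1 ▸ ha
    · rw [if_pos (by simp [ha])] at h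
      exact ih h

-- a word-plus-space keyword is a prefix of l iff the word is exactly l's first token and
-- the remainder after the first space begins with the keyword's tail
theorem pv_prefix_split (w p l : List Char) (hw : ' ' ∉ w) :
    (w ++ ' ' :: p) <+: l ↔
      (l.takeWhile (fun c => !decide (c = ' ')) = w ∧
       ∃ r, l.dropWhile (fun c => !decide (c = ' ')) = ' ' :: r ∧ p <+: r) := by
  induction w generalizing l with
  | nil =>
    cases l with
    | nil => simp
    | cons c r =>
      rw [List.nil_append, List.cons_prefix_cons]
      by_cases hc : c = ' '
      · subst hc
        simp
      · constructor
        · rintro ⟨he, -⟩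
          exact absurd he.symm hc
        · rintro ⟨h1, -⟩
          rw [List.takeWhile_cons, if_pos (by simp [hc])] at h1
          exact absurd h1 (List.cons_ne_nil _ _)
  | cons a w ih =>
    have ha : a ≠ ' ' := fun h => hw (h ▸ List.mem_cons_self)
    have hw' : ' ' ∉ w := fun h => hw (List.mem_cons_of_mem _ h)
    cases l with
    | nil => simp
    | cons c r =>
      rw [List.cons_append, List.cons_prefix_cons]
      constructor
      · rintro ⟨he, h2⟩
        subst he
        obtain ⟨h1, r', hr', hp⟩ := (ih r hw').mp h2
        refine ⟨?_, r', ?_, hp⟩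
        · rw [List.takeWhile_cons, if_pos (by simp [ha]), h1]
        · rw [List.dropWhile_cons, if_pos (by simp [ha])]
          exact hr'
      · rintro ⟨h1, r', hr', hp⟩
        by_cases hc : c = a
        · subst hc
          rw [List.takeWhile_cons, if_pos (by simp [ha])] at h1
          injection h1 with h1h h1t
          rw [List.dropWhile_cons, if_pos (by simp [ha])] at hr'
          exact ⟨rfl, (ih r hw').mpr ⟨h1t, r', hr', hp⟩⟩
        · exfalso
          by_cases hsp : c = ' '
          · subst hsp
            rw [List.takeWhile_cons, if_neg (by simp)] at h1
            exact (List.cons_ne_nil a w) h1.symm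
          · rw [List.takeWhile_cons, if_pos (by simp [hsp])] at h1
            injection h1 with h1h h1t
            exact hc h1h

-- Bool form of the split, used to rewrite each startswith test of port A
theorem pv_sw_split (l w p : List Char) (hw : ' ' ∉ w) :
    PySem.Chars.startswith l (w ++ ' ' :: p) =
      (decide (l.takeWhile (fun c => !decide (c = ' ')) = w) &&
       !(l.dropWhile (fun c => !decide (c = ' '))).isEmpty &&
       PySem.Chars.startswith ((l.dropWhile (fun c => !decide (c = ' '))).drop 1) p) := by
  rw [Bool.eq_iff_iff, PySem.Chars.startswith_iff, pv_prefix_split w p l hw]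
  rcases hd : l.dropWhile (fun c => !decide (c = ' ')) with _ | ⟨c, r⟩
  · simp
  · have hc := pv_dropWhile_head l c r hd
    subst hc
    simp [PySem.Chars.startswith_iff]

-- the empty pattern is a prefix of everything
theorem pv_sw_nil (l : List Char) : PySem.Chars.startswith l [] = true := by
  simp [PySem.Chars.startswith]

set_option maxHeartbeats 4000000 in
-- ===== VERDICT (by name: the statement is the Claim_ definition above) =====
theorem parse_action_py_spec : Claim_equal_parse_action_py := by
  intro text _
  unfold Spec_parse_action_py parse_action_py parse_action_py_alt
  generalize PySem.Str.strip (PySem.Str.lower text) = t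
  by_cases ht : t = ""
  · simp [ht]
  · simp only [if_neg ht, List.any_cons, List.any_nil, Bool.or_false,
      PySem.Str.startswith_eq, ne_eq, decide_not]
    -- each keyword test of A rewritten by pv_sw_split (keyword = word ++ ' ' :: tail, by rfl)
    have h1 : PySem.Chars.startswith t.toList "add ".toList = _ := pv_sw_split t.toList "add".toList [] (by decide)
    have h2 : PySem.Chars.startswith t.toList "buy ".toList = _ := pv_sw_split t.toList "buy".toList [] (by decide)
    have h3 : PySem.Chars.startswith t.toList "get ".toList = _ := pv_sw_split t.toList "get".toList [] (by decide)
    have h4 : PySem.Chars.startswith t.toList "need ".toList = _ := pv_sw_split t.toList "need".toList [] (by decide)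
    have h5 : PySem.Chars.startswith t.toList "pick up ".toList = _ := pv_sw_split t.toList "pick".toList "up ".toList (by decide)
    have h6 : PySem.Chars.startswith t.toList "done ".toList = _ := pv_sw_split t.toList "done".toList [] (by decide)
    have h7 : PySem.Chars.startswith t.toList "remove ".toList = _ := pv_sw_split t.toList "remove".toList [] (by decide)
    have h8 : PySem.Chars.startswith t.toList "delete ".toList = _ := pv_sw_split t.toList "delete".toList [] (by decide)
    have h9 : PySem.Chars.startswith t.toList "tick ".toList = _ := pv_sw_split t.toList "tick".toList [] (by decide)
    have h10 : PySem.Chars.startswith t.toList "bought ".toList = _ := pv_sw_split t.toList "bought".toList [] (by decide)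
    have h11 : PySem.Chars.startswith t.toList "got ".toList = _ := pv_sw_split t.toList "got".toList [] (by decide)
    have h12 : PySem.Chars.startswith t.toList "clear ".toList = _ := pv_sw_split t.toList "clear".toList [] (by decide)
    have h13 : PySem.Chars.startswith t.toList "empty ".toList = _ := pv_sw_split t.toList "empty".toList [] (by decide)
    simp only [h1, h2, h3, h4, h5, h6, h7, h8, h9, h10, h11, h12, h13]
    -- the values of the _HEAD dict at each of its keys, and at 'pick' (absent)
    have g1 : pvHEAD.getD ['a','d','d'] "show" = "add" := by decide
    have g2 : pvHEAD.getD ['b','u','y'] "show" = "add" := by decide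
    have g3 : pvHEAD.getD ['g','e','t'] "show" = "add" := by decide
    have g4 : pvHEAD.getD ['n','e','e','d'] "show" = "add" := by decide
    have g5 : pvHEAD.getD ['p','i','c','k'] "show" = "show" := by decide
    have g6 : pvHEAD.getD ['d','o','n','e'] "show" = "done" := by decide
    have g7 : pvHEAD.getD ['r','e','m','o','v','e'] "show" = "done" := by decide
    have g8 : pvHEAD.getD ['d','e','l','e','t','e'] "show" = "done" := by decide
    have g9 : pvHEAD.getD ['t','i','c','k'] "show" = "done" := by decide
    have g10 : pvHEAD.getD ['b','o','u','g','h','t'] "show" = "done" := by decide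
    have g11 : pvHEAD.getD ['g','o','t'] "show" = "done" := by decide
    have g12 : pvHEAD.getD ['c','l','e','a','r'] "show" = "clear" := by decide
    have g13 : pvHEAD.getD ['e','m','p','t','y'] "show" = "clear" := by decide
    generalize hq : List.takeWhile (fun c : Char => !decide (c = ' ')) t.toList = q
    rcases hd : List.dropWhile (fun c : Char => !decide (c = ' ')) t.toList with _ | ⟨c, r⟩
    · simp
    · simp only [List.isEmpty_cons, Bool.not_false, Bool.and_true, List.drop_succ_cons,
        List.drop_zero]
      -- both sides now depend only on the first token q, the tail r, and one startswith on r
      by_cases e1 : q = ['a','d','d']; · simp [e1, pv_sw_nil, g1]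
      by_cases e2 : q = ['b','u','y']; · simp [e2, pv_sw_nil, g2]
      by_cases e3 : q = ['g','e','t']; · simp [e3, pv_sw_nil, g3]
      by_cases e4 : q = ['n','e','e','d']; · simp [e4, pv_sw_nil, g4]
      by_cases e5 : q = ['p','i','c','k']
      · simp [e5, pv_sw_nil, g5]
      by_cases e6 : q = ['d','o','n','e']; · simp [e6, pv_sw_nil, g6]
      by_cases e7 : q = ['r','e','m','o','v','e']; · simp [e7, pv_sw_nil, g7]
      by_cases e8 : q = ['d','e','l','e','t','e']; · simp [e8, pv_sw_nil, g8]
      by_cases e9 : q = ['t','i','c','k']; · simp [e9, pv_sw_nil, g9]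
      by_cases e10 : q = ['b','o','u','g','h','t']; · simp [e10, pv_sw_nil, g10]
      by_cases e11 : q = ['g','o','t']; · simp [e11, pv_sw_nil, g11]
      by_cases e12 : q = ['c','l','e','a','r']; · simp [e12, pv_sw_nil, g12]
      by_cases e13 : q = ['e','m','p','t','y']; · simp [e13, pv_sw_nil, g13]
      -- no keyword matches: both sides fall through to "show"
      have hmk : pvHEAD = PySem.Dict.mk
          [("add".toList, "add"), ("buy".toList, "add"), ("get".toList, "add"), ("need".toList, "add"),
           ("done".toList, "done"), ("remove".toList, "done"), ("delete".toList, "done"),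
           ("tick".toList, "done"), ("bought".toList, "done"), ("got".toList, "done"),
           ("clear".toList, "clear"), ("empty".toList, "clear")] := by rfl
      have hemp : ∀ x : List Char, (PySem.Dict.mk ([] : List (List Char × String))).get? x = none :=
        fun _ => rfl
      have hmiss : pvHEAD.getD q "show" = "show" := by
        simp [hmk, PySem.Dict.getD_eq_get?_getD, PySem.Dict.get?_mk_cons, hemp,
          Ne.symm e1, Ne.symm e2, Ne.symm e3, Ne.symm e4, Ne.symm e6, Ne.symm e7,
          Ne.symm e8, Ne.symm e9, Ne.symm e10, Ne.symm e11, Ne.symm e12, Ne.symm e13]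
      simp [e1, e2, e3, e4, e5, e6, e7, e8, e9, e10, e11, e12, e13, hmiss]
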